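-- pv_equiv track=rewrite | github.com/isak-kang/coding_test | programmers/lv1/택배상자꺼내기.py | solution
-- ===== SOURCE A (Python) =====
-- def solution(n, w, num):
--     answer = 0
--     amount_list = []
--     line_list = [0] * w
--
--     for i in range(1, n+1):
--         line_list[((i-1) % w)] = i
--
--         if i % w == 0 or i == n:
--             amount_list.append(line_list)
--             line_list = [0] * w
--
--     for j in range(len(amount_list)):
--         if j % 2 == 1:
--             amount_list[j] = list(reversed(amount_list[j]))
--
--
--
--     for k in range(len(amount_list)):
--         try :
--             second_index_num = amount_list[k].index(num)
--             first_index_num = k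
--             break
--         except:
--             pass
--
--     if k == len(amount_list)-1:
--         answer = 0
--
--     elif amount_list[-1][second_index_num] == 0:
--         answer = len(amount_list) - 1  -k
--     else :
--         answer = len(amount_list)  - k
--
--     return answer
-- ===== SOURCE B (Python) =====
-- def solution(n, w, num):
--     # O(1) arithmetic: locate num's row/column directly and count rows above it.
--     rows = -(-n // w)                # ceil(n / w)
--     if num < 1 or num > n:
--         return 0
--     k = (num - 1) // w               # 0-based row of num (bottom row is 0)
--     if k == rows - 1:
--         return 0
--     c0 = (num - 1) % w               # column before the snake reversal
--     col = w - 1 - c0 if k % 2 == 1 else c0   # displayed column of num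
--     r = rows - 1                     # top row
--     c = w - 1 - col if r % 2 == 1 else col   # that column's slot in the top row
--     return rows - 1 - k if c >= n - r * w else rows - k
-- ===== Notes on version B (the rewrite author's own statement) =====
-- stated objective: faster
-- what changed: B replaces A's construction of the whole snaking box grid (building every row, reversing odd rows, linearly searching each row for num) by O(1) div/mod arithmetic that computes num's row and displayed column and whether the top row has a box in that column.
import Mathlib
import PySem

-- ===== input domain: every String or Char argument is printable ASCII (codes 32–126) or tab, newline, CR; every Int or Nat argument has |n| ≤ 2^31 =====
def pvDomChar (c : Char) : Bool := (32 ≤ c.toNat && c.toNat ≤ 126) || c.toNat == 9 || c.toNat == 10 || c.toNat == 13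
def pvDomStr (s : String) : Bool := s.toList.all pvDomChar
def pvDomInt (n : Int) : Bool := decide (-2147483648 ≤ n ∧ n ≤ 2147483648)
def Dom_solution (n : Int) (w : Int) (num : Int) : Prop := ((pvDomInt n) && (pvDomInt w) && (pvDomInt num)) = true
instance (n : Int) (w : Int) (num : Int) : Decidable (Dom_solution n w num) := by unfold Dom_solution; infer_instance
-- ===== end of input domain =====

-- B replaces A's O(n) construction-and-scan of the snaking box grid by O(1) div/mod arithmetic.

-- ===== PORT A =====
-- body of A's first loop: place box i in the current line, append the line when full or when i == n
def pvBody1 (n : Int) (w : Int) (st : List (List Int) × List Int) (i : Int) : List (List Int) × List Int :=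
  let line := PySem.List.pySetD st.2 (PySem.Int.mod (i - 1) w) i
  if PySem.Int.mod i w == 0 || i == n then (st.1 ++ [line], List.replicate w.toNat 0)
  else (st.1, line)

-- body of A's second loop: reverse the rows with odd index in place
def pvBody2 (acc : List (List Int)) (j : Int) : List (List Int) :=
  if PySem.Int.mod j 2 == 1 then PySem.List.pySetD acc j (PySem.List.pyGetD acc j []).reverse
  else acc

-- A's third loop: try row.index(num) on each row, break at the first hit (none = loop fell through)
def pvFindRow : List (List Int) → Int → Int → Option (Int × Nat)
  | [], _, _ => none
  | r :: rest, num, k =>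
    match PySem.List.index? r num with
    | some idx => some (k, idx)
    | none => pvFindRow rest num (k + 1)

def solution (n : Int) (w : Int) (num : Int) : Int :=
  let st := (PySem.List.pyRange 1 (n + 1) 1).foldl (pvBody1 n w) ([], List.replicate w.toNat 0)
  let amount := (PySem.List.pyRange 0 (PySem.List.len st.1) 1).foldl pvBody2 st.1
  match pvFindRow amount num 0 with
  | none => 0  -- loop fell through: k ended at len-1, the first branch returns 0
  | some (k, idx) =>
    if k == PySem.List.len amount - 1 then 0
    -- amount[-1][idx]: always in range here (rows have width w); getD-form of the in-range access
    else if PySem.List.pyGetD (PySem.List.pyGetD amount (-1) []) (idx : Int) 0 == 0 then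
      PySem.List.len amount - 1 - k
    else PySem.List.len amount - k

-- ===== PORT B =====
def solution_alt (n : Int) (w : Int) (num : Int) : Int :=
  let rows := -(PySem.Int.floordiv (-n) w)
  if num < 1 ∨ num > n then 0
  else
    let k := PySem.Int.floordiv (num - 1) w
    if k == rows - 1 then 0
    else
      let c0 := PySem.Int.mod (num - 1) w
      let col := if PySem.Int.mod k 2 == 1 then w - 1 - c0 else c0
      let r := rows - 1
      let c := if PySem.Int.mod r 2 == 1 then w - 1 - col else col
      if c ≥ n - r * w then rows - 1 - k else rows - k

-- ===== PRECONDITION & SPEC =====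
-- A raises outside 1 ≤ n ∧ 1 ≤ w: UnboundLocalError for n < 1 (the search loop never runs),
-- ZeroDivisionError / IndexError for w < 1.
def Pre_solution (n : Int) (w : Int) (num : Int) : Prop := 1 ≤ n ∧ 1 ≤ w
instance (n : Int) (w : Int) (num : Int) : Decidable (Pre_solution n w num) := by
  unfold Pre_solution; infer_instance
def pvWitness_solution : Int × Int × Int := (7, 3, 4)

def Spec_solution (n : Int) (w : Int) (num : Int) (out : Int) : Prop := out = solution_alt n w num
instance (n : Int) (w : Int) (num : Int) (out : Int) : Decidable (Spec_solution n w num out) := by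
  unfold Spec_solution; infer_instance

-- ===== CLAIM (what is proved, stated in full; the proofs are below) =====
def Claim_equal_solution : Prop := ∀ (n : Int) (w : Int) (num : Int), Dom_solution n w num →
  Pre_solution n w num → Spec_solution n w num (solution n w num)

-- ===== LEMMAS AND PROOFS =====

-- the row of the grid holding boxes j*w+1 .. min((j+1)*w, n), 0-padded to width w
def pvRowF (n w j : Int) : List Int :=
  (List.range w.toNat).map (fun c : Nat => if j * w + (c : Int) + 1 <= n then j * w + (c : Int) + 1 else 0)

-- the row as displayed after A's second loop (odd rows reversed)
def pvDisp (n w : Int) (j : Nat) : List Int :=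
  if j % 2 = 1 then (pvRowF n w (j : Int)).reverse else pvRowF n w (j : Int)

-- uniqueness of floor div/mod for a positive divisor
theorem pvDivmod (w q r : Int) (hw : 0 < w) (h0 : 0 <= r) (hr : r < w) :
    (w * q + r) / w = q ∧ (w * q + r) % w = r := by
  constructor
  · rw [add_comm, Int.add_mul_ediv_left r q (by omega), Int.ediv_eq_zero_of_lt h0 hr]; omega
  · rw [add_comm, Int.add_mul_emod_self_left, Int.emod_eq_of_lt h0 hr]

theorem pvRowF_length (n w j : Int) : (pvRowF n w j).length = w.toNat := by
  simp [pvRowF]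

theorem pvRowF_replicate (n w j : Int) (h : n <= j * w) : pvRowF n w j = List.replicate w.toNat 0 := by
  unfold pvRowF
  rw [List.eq_replicate_iff]
  refine ⟨by simp, ?_⟩
  intro b hb
  simp only [List.mem_map, List.mem_range] at hb
  obtain ⟨c, _, hb⟩ := hb
  have hc0 : (0:Int) <= (c:Int) := Int.natCast_nonneg c
  rw [if_neg (by intro hcon; linarith)] at hb
  omega

theorem pvRowF_congr_full (n₁ n₂ w j : Int) (h1 : j * w + w <= n₁) (h2 : j * w + w <= n₂) :
    pvRowF n₁ w j = pvRowF n₂ w j := by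
  unfold pvRowF
  apply List.map_congr_left
  intro c hc
  simp only [List.mem_range] at hc
  have hcw : (c : Int) < w := by omega
  rw [if_pos (by linarith), if_pos (by linarith)]

-- setting position m % w of the partial row to m+1 extends it by one box
theorem pvRowF_succ (m w : Int) (hw : 0 < w) (hm : 0 <= m) :
    (pvRowF m w (m / w)).set (m % w).toNat (m + 1) = pvRowF (m + 1) w (m / w) := by
  have hqr : w * (m / w) + m % w = m := Int.ediv_add_emod m w
  have hr0 : 0 <= m % w := Int.emod_nonneg m (by omega)
  have hrw : m % w < w := Int.emod_lt_of_pos m hw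
  have hmul : (m / w) * w = w * (m / w) := mul_comm _ _
  apply List.ext_getElem
  · simp [pvRowF]
  · intro i h1 h2
    simp only [pvRowF, List.getElem_set, List.getElem_map, List.getElem_range]
    simp only [pvRowF, List.length_set, List.length_map, List.length_range] at h1
    rw [hmul]
    generalize hA : w * (m / w) = A at *
    split_ifs <;> omega

-- invariant of A's first loop after processing i = 1..m, for m < n
theorem pvLoop1_inv (n w : Int) (hw : 1 <= w) :
    ∀ m : Int, 0 <= m → m < n →
    (PySem.List.pyRange 1 (m + 1) 1).foldl (pvBody1 n w) ([], List.replicate w.toNat 0)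
      = ((List.range ((m / w).toNat)).map (fun j : Nat => pvRowF n w (j : Int)), pvRowF m w (m / w)) := by
  intro m hm
  induction m, hm using Int.le_induction with
  | base =>
    intro _
    rw [PySem.List.pyRange_one_eq_nil (by omega)]
    simp only [List.foldl_nil, Int.zero_ediv, Int.toNat_zero, List.range_zero, List.map_nil]
    rw [pvRowF_replicate 0 w 0 (by simp)]
  | succ m hm ih =>
    intro hmn
    rw [PySem.List.pyRange_one_succ_right (by omega), List.foldl_append, ih (by omega),
        List.foldl_cons, List.foldl_nil]
    have hqr : w * (m / w) + m % w = m := Int.ediv_add_emod m w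
    have hr0 : 0 <= m % w := Int.emod_nonneg m (by omega)
    have hrw : m % w < w := Int.emod_lt_of_pos m (by omega)
    have hq0 : 0 <= m / w := Int.ediv_nonneg hm (by omega)
    have hline : PySem.List.pySetD (pvRowF m w (m / w)) (PySem.Int.mod (m + 1 - 1) w) (m + 1)
        = pvRowF (m + 1) w (m / w) := by
      rw [show m + 1 - 1 = m by ring, PySem.Int.mod_eq_emod_of_pos (by omega),
          PySem.List.pySetD_of_nonneg _ _ hr0, pvRowF_succ m w (by omega) hm]
    unfold pvBody1
    simp only [hline]
    by_cases hcase : m % w = w - 1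
    · -- the row is full: it is appended, a fresh zero row starts
      have hdm : (m + 1) / w = m / w + 1 ∧ (m + 1) % w = 0 := by
        have := pvDivmod w (m / w + 1) 0 (by omega) le_rfl (by omega)
        have harg : w * (m / w + 1) + 0 = m + 1 := by rw [mul_add]; omega
        rw [harg] at this; exact this
      rw [if_pos]
      · rw [Prod.ext_iff]
        constructor
        · simp only
          rw [hdm.1, show (m / w + 1).toNat = (m / w).toNat + 1 by omega, List.range_succ,
              List.map_append, List.map_singleton]
          congr 1
          rw [show (((m / w).toNat : Nat) : Int) = m / w by omega]
          rw [pvRowF_congr_full (m + 1) n w (m / w) (by nlinarith) (by nlinarith)]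
        · simp only
          rw [hdm.1, pvRowF_replicate (m + 1) w (m / w + 1) (by nlinarith)]
      · rw [PySem.Int.mod_eq_emod_of_pos (by omega), hdm.2]
        simp
    · -- the row is not yet full and m+1 < n: no append
      have hdm : (m + 1) / w = m / w ∧ (m + 1) % w = m % w + 1 := by
        have := pvDivmod w (m / w) (m % w + 1) (by omega) (by omega) (by omega)
        have harg : w * (m / w) + (m % w + 1) = m + 1 := by omega
        rw [harg] at this; exact this
      rw [if_neg]
      · rw [Prod.ext_iff]
        exact ⟨by simp [hdm.1], by simp [hdm.1]⟩
      · rw [PySem.Int.mod_eq_emod_of_pos (by omega), hdm.2]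
        simp only [Bool.or_eq_true, beq_iff_eq]
        rintro (hc | hc) <;> omega

-- full first loop: ceil(n/w) rows, the last one 0-padded
theorem pvLoop1 (n w : Int) (hn : 1 <= n) (hw : 1 <= w) :
    ((PySem.List.pyRange 1 (n + 1) 1).foldl (pvBody1 n w) ([], List.replicate w.toNat 0)).1
      = (List.range (((n - 1) / w).toNat + 1)).map (fun j : Nat => pvRowF n w (j : Int)) := by
  have hinv := pvLoop1_inv n w hw (n - 1) (by omega) (by omega)
  rw [show n - 1 + 1 = n by ring] at hinv
  rw [PySem.List.pyRange_one_succ_right (by omega), List.foldl_append, hinv,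
      List.foldl_cons, List.foldl_nil]
  have hr0 : 0 <= (n - 1) % w := Int.emod_nonneg (n - 1) (by omega)
  have hq0 : 0 <= (n - 1) / w := Int.ediv_nonneg (by omega) (by omega)
  have hline : PySem.List.pySetD (pvRowF (n - 1) w ((n - 1) / w)) (PySem.Int.mod (n - 1) w) n
      = pvRowF n w ((n - 1) / w) := by
    rw [PySem.Int.mod_eq_emod_of_pos (by omega), PySem.List.pySetD_of_nonneg _ _ hr0]
    have := pvRowF_succ (n - 1) w (by omega) (by omega)
    rw [show n - 1 + 1 = n by ring] at this
    exact this
  unfold pvBody1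
  rw [show ((PySem.Int.mod n w == 0 || n == n) = true) by simp]
  simp only [if_true]
  rw [hline, List.range_succ, List.map_append, List.map_singleton,
      show (((((n - 1) / w).toNat : Nat)) : Int) = (n - 1) / w by omega]

theorem pvBody2_append (l : List (List Int)) (x : List Int) (j : Int)
    (h0 : 0 <= j) (hj : j < (l.length : Int)) :
    pvBody2 (l ++ [x]) j = pvBody2 l j ++ [x] := by
  unfold pvBody2
  split
  · rw [PySem.List.pySetD_of_nonneg _ _ h0, PySem.List.pySetD_of_nonneg _ _ h0,
        PySem.List.pyGetD_of_nonneg _ _ h0, PySem.List.pyGetD_of_nonneg _ _ h0,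
        List.set_append_left _ _ (by omega)]
    congr 2
    rw [List.getD_eq_getElem?_getD, List.getD_eq_getElem?_getD,
        List.getElem?_append_left (by omega)]
  · rfl

theorem pvBody2_length (acc : List (List Int)) (j : Int) : (pvBody2 acc j).length = acc.length := by
  unfold pvBody2
  split
  · exact PySem.List.length_pySetD _ _ _
  · rfl

theorem pvFoldl_body2_append (js : List Int) :
    ∀ (l : List (List Int)) (x : List Int), (∀ j ∈ js, 0 <= j ∧ j < (l.length : Int)) →
    js.foldl pvBody2 (l ++ [x]) = js.foldl pvBody2 l ++ [x] := by
  induction js with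
  | nil => intro l x _; rfl
  | cons j js ih =>
    intro l x h
    have hj := h j (by simp)
    rw [List.foldl_cons, List.foldl_cons, pvBody2_append l x j hj.1 hj.2, ih]
    intro j' hj'
    rw [pvBody2_length]
    exact h j' (by simp [hj'])

-- A's second loop on a row list given as a map over range
theorem pvSet_last (L : Nat) (ys : List (List Int)) (z : List Int) (hl : ys.length = L) :
    (ys ++ [z]).set L (((ys ++ [z])[L]?).getD []).reverse = ys ++ [z.reverse] := by
  subst hl
  rw [List.getElem?_concat_length, Option.getD_some,
      List.set_append_right _ _ (le_refl _), Nat.sub_self]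
  rfl

theorem pvLoop2 (n w : Int) : ∀ (L : Nat),
    (PySem.List.pyRange 0 (L : Int) 1).foldl pvBody2
        ((List.range L).map (fun j : Nat => pvRowF n w (j : Int)))
      = (List.range L).map (pvDisp n w) := by
  intro L
  induction L with
  | zero => rw [PySem.List.pyRange_one_eq_nil (by omega)]; rfl
  | succ L ih =>
    rw [show ((L + 1 : Nat) : Int) = (L : Int) + 1 by push_cast; ring,
        PySem.List.pyRange_one_succ_right (by positivity), List.foldl_append,
        List.range_succ, List.map_append, List.map_singleton,
        pvFoldl_body2_append _ _ _ (by
          intro j hj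
          rw [PySem.List.mem_pyRange_one] at hj
          simp only [List.length_map, List.length_range]
          exact ⟨hj.1, hj.2⟩),
        ih, List.foldl_cons, List.foldl_nil]
    unfold pvBody2
    have hlen : ((List.range L).map (pvDisp n w)).length = L := by simp
    have hmod : PySem.Int.mod (L : Int) 2 = ((L % 2 : Nat) : Int) := by
      exact_mod_cast PySem.Int.mod_natCast L 2
    by_cases hpar : L % 2 = 1
    · rw [if_pos (by rw [hmod, hpar]; rfl)]
      rw [PySem.List.pySetD_of_nonneg _ _ (by positivity),
          PySem.List.pyGetD_of_nonneg _ _ (by positivity)]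
      simp only [Int.toNat_natCast]
      rw [List.getD_eq_getElem?_getD, pvSet_last L _ _ hlen,
          List.map_append, List.map_singleton]
      congr 1
      congr 1
      simp [pvDisp, hpar]
    · rw [if_neg (by rw [hmod]; simp only [beq_iff_eq]; omega)]
      rw [List.map_append, List.map_singleton]
      congr 1
      congr 1
      simp [pvDisp, hpar]

theorem pvFindRow_none (num s : Int) : ∀ (l : List (List Int)), (∀ r ∈ l, num ∉ r) →
    ∀ s, pvFindRow l num s = none := by
  intro l
  induction l with
  | nil => intro _ _; rfl
  | cons r rest ih =>
    intro h s
    have hr : PySem.List.index? r num = none := by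
      rw [PySem.List.index?_eq_none_iff]
      exact h r (by simp)
    unfold pvFindRow
    rw [hr]
    exact ih (fun r' hr' => h r' (by simp [hr'])) (s + 1)

theorem pvFindRow_found (num : Int) (r : List Int) (suf : List (List Int)) (idx : Nat)
    (hidx : PySem.List.index? r num = some idx) :
    ∀ (pre : List (List Int)) (s : Int), (∀ x ∈ pre, num ∉ x) →
    pvFindRow (pre ++ r :: suf) num s = some (s + pre.length, idx) := by
  intro pre
  induction pre with
  | nil =>
    intro s _
    simp only [List.nil_append, pvFindRow, hidx]
    norm_num
  | cons p pre ih =>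
    intro s h
    have hp : PySem.List.index? p num = none := by
      rw [PySem.List.index?_eq_none_iff]
      exact h p (by simp)
    simp only [List.cons_append, pvFindRow, hp]
    rw [ih (s + 1) (fun x hx => h x (by simp [hx]))]
    congr 1
    rw [Prod.ext_iff]
    refine ⟨?_, rfl⟩
    simp only [List.length_cons]
    push_cast
    ring

theorem pvFindRow_last (num : Int) (last : List Int) (pre : List (List Int))
    (h : ∀ r ∈ pre, num ∉ r) :
    pvFindRow (pre ++ [last]) num 0 = none ∨
      ∃ idx, pvFindRow (pre ++ [last]) num 0 = some ((pre.length : Int), idx) := by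
  cases hidx : PySem.List.index? last num with
  | none =>
    left
    apply pvFindRow_none num 0
    · intro r hr
      rcases List.mem_append.mp hr with h1 | h1
      · exact h r h1
      · rw [List.mem_singleton] at h1
        subst h1
        rw [← PySem.List.index?_eq_none_iff]
        exact hidx
  | some idx =>
    right
    refine ⟨idx, ?_⟩
    rw [pvFindRow_found num last [] idx hidx pre 0 h]
    norm_num

-- membership facts about pvRowF
theorem pvMem_rowF (n w j x : Int) (hx : x ∈ pvRowF n w j) :
    x = 0 ∨ ∃ c : Int, 0 <= c ∧ c < w ∧ x = j * w + c + 1 ∧ x <= n := by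
  simp only [pvRowF, List.mem_map, List.mem_range] at hx
  obtain ⟨c, hc, hx⟩ := hx
  split_ifs at hx with hcond
  · right
    exact ⟨(c : Int), by positivity, by omega, hx.symm, by omega⟩
  · left; omega

theorem pvNot_mem_rowF_ne (n w j num : Int) (hw : 1 <= w) (hnum : 1 <= num) (hj : 0 <= j)
    (hne : j ≠ (num - 1) / w) : num ∉ pvRowF n w j := by
  intro hmem
  rcases pvMem_rowF n w j num hmem with h0 | ⟨c, hc0, hcw, hval, _⟩
  · omega
  · apply hne
    have harg : num - 1 = w * j + c := by rw [hval]; ring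
    rw [harg, (pvDivmod w j c (by omega) hc0 hcw).1]

theorem pvNot_mem_rowF_out (n w j num : Int) (hw : 0 < w) (hn : 0 <= n) (hj : 0 <= j)
    (hnum : num < 0 ∨ n < num) : num ∉ pvRowF n w j := by
  intro hmem
  rcases pvMem_rowF n w j num hmem with h0 | ⟨c, hc0, hcw, hval, hle⟩
  · omega
  · have : 0 <= j * w := by positivity
    rcases hnum with h | h <;> omega

theorem pvZero_not_mem_rowF (n w j : Int) (hw : 0 < w) (hj : 0 <= j) (hfull : j * w + w <= n) :
    (0 : Int) ∉ pvRowF n w j := by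
  intro hmem
  simp only [pvRowF, List.mem_map, List.mem_range] at hmem
  obtain ⟨c, hc, hval⟩ := hmem
  have hcw : (c : Int) < w := by omega
  have hjw : 0 <= j * w := by positivity
  split_ifs at hval with hcond
  · omega
  · have hc0 : (0:Int) <= (c:Int) := by positivity
    exact hcond (by linarith)

-- splitting range at a marked position
theorem pvRange_split (a b : Nat) :
    List.range (a + 1 + b) = List.range a ++ a :: (List.range b).map (fun d => a + 1 + d) := by
  rw [show a + 1 + b = a + (b + 1) by ring, List.range_add, List.range_succ_eq_map]
  simp only [List.map_cons, List.map_map, Nat.add_zero]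
  congr 2
  apply List.map_congr_left
  intro d _
  simp only [Function.comp_apply]
  omega

-- the row of num decomposes around num, which occurs exactly once
theorem pvRowF_split (n w num : Int) (hw : 1 <= w) (h1 : 1 <= num) (h2 : num <= n) :
    ∃ P S : List Int, pvRowF n w ((num - 1) / w) = P ++ num :: S ∧
      P.length = ((num - 1) % w).toNat ∧ S.length = w.toNat - ((num - 1) % w).toNat - 1 ∧
      num ∉ P ∧ num ∉ S := by
  set q := (num - 1) / w with hqdef
  set r := (num - 1) % w with hrdef
  have hqr : w * q + r = num - 1 := Int.ediv_add_emod (num - 1) w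
  have hr0 : 0 <= r := Int.emod_nonneg (num - 1) (by omega)
  have hrw : r < w := Int.emod_lt_of_pos (num - 1) (by omega)
  have hq0 : 0 <= q := Int.ediv_nonneg (by omega) (by omega)
  have hmul : q * w = w * q := mul_comm _ _
  set h : Nat → Int := fun c => if q * w + (c : Int) + 1 <= n then q * w + (c : Int) + 1 else 0
    with hh
  obtain ⟨b, hb⟩ : ∃ b, w.toNat = r.toNat + 1 + b := ⟨w.toNat - r.toNat - 1, by omega⟩
  have hhead : h r.toNat = num := by
    rw [hh]
    simp only
    rw [if_pos (by rw [hmul]; omega), hmul]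
    omega
  refine ⟨(List.range r.toNat).map h,
      ((List.range b).map (fun d => r.toNat + 1 + d)).map h, ?_,
      by simp, by
        simp only [List.length_map, List.length_range]
        omega, ?_, ?_⟩
  · show (List.range w.toNat).map h = _
    rw [hb, pvRange_split, List.map_append, List.map_cons, List.map_map, hhead]
  · intro hmem
    simp only [List.mem_map, List.mem_range, hh] at hmem
    obtain ⟨c, hc, hval⟩ := hmem
    rw [hmul] at hval
    split_ifs at hval <;> omega
  · intro hmem
    simp only [List.mem_map, List.mem_range, hh] at hmem
    obtain ⟨d, ⟨c, hc, hcd⟩, hval⟩ := hmem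
    rw [hmul] at hval
    split_ifs at hval <;> omega

-- index of num in its own row
theorem pvIndex_rowF (n w num : Int) (hw : 1 <= w) (h1 : 1 <= num) (h2 : num <= n) :
    PySem.List.index? (pvRowF n w ((num - 1) / w)) num = some ((num - 1) % w).toNat := by
  obtain ⟨P, S, hsplit, hP, _, hnP, _⟩ := pvRowF_split n w num hw h1 h2
  rw [hsplit, PySem.List.index?_eq_some_iff]
  exact ⟨P, S, rfl, hP, hnP⟩

theorem pvIndex_rowF_rev (n w num : Int) (hw : 1 <= w) (h1 : 1 <= num) (h2 : num <= n) :
    PySem.List.index? (pvRowF n w ((num - 1) / w)).reverse num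
      = some (w.toNat - 1 - ((num - 1) % w).toNat) := by
  obtain ⟨P, S, hsplit, hP, hS, hnP, hnS⟩ := pvRowF_split n w num hw h1 h2
  rw [hsplit]
  rw [show (P ++ num :: S).reverse = S.reverse ++ num :: P.reverse by
    simp [List.reverse_append]]
  rw [PySem.List.index?_eq_some_iff]
  refine ⟨S.reverse, P.reverse, rfl, ?_, by simp [hnS]⟩
  rw [List.length_reverse, hS]
  omega

-- element access in a row / displayed row
theorem pvRowF_getD (n w j : Int) (c : Nat) (hc : c < w.toNat) :
    (pvRowF n w j).getD c 0 = if j * w + (c : Int) + 1 <= n then j * w + (c : Int) + 1 else 0 := by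
  rw [List.getD_eq_getElem?_getD]
  simp only [pvRowF]
  rw [List.getElem?_map]
  rw [List.getElem?_range hc]
  rfl

theorem pvDisp_getD (n w : Int) (j c : Nat) (hc : c < w.toNat) :
    (pvDisp n w j).getD c 0
      = (pvRowF n w (j : Int)).getD (if j % 2 = 1 then w.toNat - 1 - c else c) 0 := by
  unfold pvDisp
  split_ifs with hpar
  · rw [List.getD_eq_getElem?_getD, List.getD_eq_getElem?_getD,
        List.getElem?_reverse (by rw [pvRowF_length]; exact hc), pvRowF_length]
  · rfl

-- B's ceiling division equals (n-1)/w + 1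
theorem pvRows_eq (n w : Int) (hn : 1 <= n) (hw : 1 <= w) :
    -(PySem.Int.floordiv (-n) w) = (n - 1) / w + 1 := by
  rw [PySem.Int.neg_floordiv_neg_eq_iff_of_pos (by omega)]
  have hqr : w * ((n - 1) / w) + (n - 1) % w = n - 1 := Int.ediv_add_emod (n - 1) w
  have hr0 : 0 <= (n - 1) % w := Int.emod_nonneg (n - 1) (by omega)
  have hrw : (n - 1) % w < w := Int.emod_lt_of_pos (n - 1) (by omega)
  constructor
  · nlinarith [hqr]
  · nlinarith [hqr]

-- parity test on a cast Nat
theorem pvMod2 (a : Nat) : (PySem.Int.mod (a : Int) 2 == 1) = decide (a % 2 = 1) := by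
  rw [show PySem.Int.mod (a : Int) 2 = ((a % 2 : Nat) : Int) from by
    exact_mod_cast PySem.Int.mod_natCast a 2]
  by_cases h : a % 2 = 1
  · simp [h]
  · have h0 : a % 2 = 0 := by omega
    simp [h0]

-- div/mod data bundle
theorem pvDM (a w : Int) (hw : 0 < w) (ha : 0 <= a) :
    ∃ q r : Int, a / w = q ∧ a % w = r ∧ w * q + r = a ∧ 0 <= r ∧ r < w ∧ 0 <= q :=
  ⟨a / w, a % w, rfl, rfl, Int.ediv_add_emod a w, Int.emod_nonneg a (by omega),
   Int.emod_lt_of_pos a hw, Int.ediv_nonneg ha (by omega)⟩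

-- ===== VERDICT (by name: the statement is the Claim_ definition above) =====
theorem solution_spec : Claim_equal_solution := by
  unfold Claim_equal_solution
  intro n w num _ hpre
  obtain ⟨hn, hw⟩ := hpre
  unfold Spec_solution
  obtain ⟨qn, rn, hqn, hrn, hqnr, hrn0, hrnw, hqn0⟩ := pvDM (n - 1) w (by omega) (by omega)
  simp only [solution, solution_alt]
  rw [pvLoop1 n w hn hw, pvRows_eq n w hn hw, hqn]
  set L : Nat := qn.toNat + 1 with hL
  have hlen1 : PySem.List.len ((List.range L).map (fun j : Nat => pvRowF n w (j : Int)))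
      = (L : Int) := by simp
  rw [hlen1, pvLoop2 n w L]
  have hlen2 : PySem.List.len ((List.range L).map (pvDisp n w)) = (L : Int) := by simp
  rw [hlen2]
  by_cases hin : 1 <= num ∧ num <= n
  · -- num is one of the boxes
    obtain ⟨qm, rm, hqm, hrm, hqmr, hrm0, hrmw, hqm0⟩ := pvDM (num - 1) w (by omega) (by omega)
    rw [if_neg (by omega), PySem.Int.floordiv_eq_ediv_of_pos (show (0:Int) < w by omega),
        PySem.Int.mod_eq_emod_of_pos (show (0:Int) < w by omega), hqm, hrm]
    have hqmn : qm <= qn := by nlinarith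
    have hlastv : PySem.List.pyGetD ((List.range L).map (pvDisp n w)) (-1) []
        = pvDisp n w qn.toNat := by
      have hdec2 : (List.range L).map (pvDisp n w)
          = (List.range qn.toNat).map (pvDisp n w) ++ [pvDisp n w qn.toNat] := by
        rw [hL, List.range_succ, List.map_append, List.map_singleton]
      rw [hdec2, PySem.List.pyGetD_neg_one_append_singleton]
    rw [hlastv]
    obtain ⟨b, hb⟩ : ∃ b, L = qm.toNat + 1 + b := ⟨L - qm.toNat - 1, by omega⟩
    set idxv := if qm.toNat % 2 = 1 then w.toNat - 1 - rm.toNat else rm.toNat with hidxv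
    have hqmcast : ((qm.toNat : Nat) : Int) = qm := by omega
    have hqncast : ((qn.toNat : Nat) : Int) = qn := by omega
    have hidx : PySem.List.index? (pvDisp n w qm.toNat) num = some idxv := by
      unfold pvDisp
      rw [hidxv, hqmcast]
      split_ifs with hpar
      · have := pvIndex_rowF_rev n w num hw hin.1 hin.2
        rw [hqm, hrm] at this
        exact this
      · have := pvIndex_rowF n w num hw hin.1 hin.2
        rw [hqm, hrm] at this
        exact this
    have hpre2 : ∀ x ∈ (List.range qm.toNat).map (pvDisp n w), num ∉ x := by
      intro x hx
      simp only [List.mem_map, List.mem_range] at hx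
      obtain ⟨j, hj, rfl⟩ := hx
      have hnm : num ∉ pvRowF n w (j : Int) := by
        apply pvNot_mem_rowF_ne n w (j : Int) num hw hin.1 (by positivity)
        rw [hqm]
        omega
      unfold pvDisp
      split_ifs
      · rw [List.mem_reverse]; exact hnm
      · exact hnm
    have hdec : (List.range L).map (pvDisp n w)
        = (List.range qm.toNat).map (pvDisp n w) ++ pvDisp n w qm.toNat ::
          ((List.range b).map (fun d => qm.toNat + 1 + d)).map (pvDisp n w) := by
      rw [hb, pvRange_split, List.map_append, List.map_cons]
    rw [hdec, pvFindRow_found num _ _ idxv hidx _ 0 hpre2]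
    simp only [List.length_map, List.length_range]
    simp only [show qn + 1 - 1 = qn from by ring]
    rw [← hqmcast, ← hqncast, pvMod2 qm.toNat, pvMod2 qn.toNat]
    simp only [decide_eq_true_eq, Int.toNat_natCast]
    by_cases hlast : qm = qn
    · rw [if_pos (show ((0 + (qm.toNat : Int) == ((L : Nat) : Int) - 1) = true) from by
          simp only [beq_iff_eq]; omega),
        if_pos (show (((qm.toNat : Int) == (qn.toNat : Int)) = true) from by
          simp only [beq_iff_eq]; omega)]
    · rw [if_neg (show ¬((0 + (qm.toNat : Int) == ((L : Nat) : Int) - 1) = true) from by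
          simp only [beq_iff_eq]; omega),
        if_neg (show ¬(((qm.toNat : Int) == (qn.toNat : Int)) = true) from by
          simp only [beq_iff_eq]; omega)]
      have hidxlt : idxv < w.toNat := by rw [hidxv]; split_ifs <;> omega
      set cA := if qn.toNat % 2 = 1 then w.toNat - 1 - idxv else idxv with hcA
      have hcAlt : cA < w.toNat := by rw [hcA]; split_ifs <;> omega
      have hentry : PySem.List.pyGetD (pvDisp n w qn.toNat) (idxv : Int) 0
          = if (qn.toNat : Int) * w + (cA : Int) + 1 <= n
            then (qn.toNat : Int) * w + (cA : Int) + 1 else 0 := by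
        rw [PySem.List.pyGetD_of_nonneg _ _ (by positivity), Int.toNat_natCast,
            pvDisp_getD n w qn.toNat idxv hidxlt, ← hcA, pvRowF_getD n w _ cA hcAlt]
      rw [hentry]
      have hceq : ((cA : Nat) : Int)
          = (if qn.toNat % 2 = 1
             then w - 1 - (if qm.toNat % 2 = 1 then w - 1 - rm else rm)
             else (if qm.toNat % 2 = 1 then w - 1 - rm else rm)) := by
        rw [hcA, hidxv]
        split_ifs <;> omega
      rw [← hceq]
      have hl1 : ((qn.toNat : Nat) : Int) * w = w * qn := by rw [hqncast, mul_comm]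
      have hl2 : qn * w = w * qn := mul_comm _ _
      by_cases hcond : ((qn.toNat : Nat) : Int) * w + ((cA : Nat) : Int) + 1 <= n
      · rw [if_pos hcond]
        have hne0 : ((((qn.toNat : Nat) : Int) * w + ((cA : Nat) : Int) + 1) == 0) = false := by
          simp only [beq_eq_false_iff_ne]
          have hp : (0:Int) <= ((qn.toNat : Nat) : Int) * w := by positivity
          omega
        rw [hne0]
        simp only [Bool.false_eq_true, if_false]
        rw [if_neg (by omega)]
        omega
      · rw [if_neg hcond]
        simp only [beq_self_eq_true, if_true]
        rw [if_pos (by omega)]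
        omega
  · -- num is not a box number: both sides give 0
    rw [if_pos (by omega)]
    by_cases h0 : num = 0
    · subst h0
      have hdec2 : (List.range L).map (pvDisp n w)
          = (List.range qn.toNat).map (pvDisp n w) ++ [pvDisp n w qn.toNat] := by
        rw [hL, List.range_succ, List.map_append, List.map_singleton]
      have hpre0 : ∀ x ∈ (List.range qn.toNat).map (pvDisp n w), (0 : Int) ∉ x := by
        intro x hx
        simp only [List.mem_map, List.mem_range] at hx
        obtain ⟨j, hj, rfl⟩ := hx
        have hnm : (0 : Int) ∉ pvRowF n w (j : Int) := by
          apply pvZero_not_mem_rowF n w (j : Int) (by omega) (by positivity)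
          have hj1 : (j : Int) + 1 <= qn := by omega
          nlinarith
        unfold pvDisp
        split_ifs
        · rw [List.mem_reverse]; exact hnm
        · exact hnm
      rw [hdec2]
      rcases pvFindRow_last 0 (pvDisp n w qn.toNat) _ hpre0 with hnone | ⟨idx, hsome⟩
      · rw [hnone]
      · rw [hsome]
        simp only [List.length_map, List.length_range]
        rw [if_pos (by simp only [beq_iff_eq]; omega)]
    · have hall : ∀ x ∈ (List.range L).map (pvDisp n w), num ∉ x := by
        intro x hx
        simp only [List.mem_map, List.mem_range] at hx
        obtain ⟨j, hj, rfl⟩ := hx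
        have hnm : num ∉ pvRowF n w (j : Int) := by
          apply pvNot_mem_rowF_out n w (j : Int) num (by omega) (by omega) (by positivity)
          omega
        unfold pvDisp
        split_ifs
        · rw [List.mem_reverse]; exact hnm
        · exact hnm
      rw [pvFindRow_none num 0 _ hall 0]
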